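-- pv_equiv track=rewrite | github.com/rjudy1/Code-Golf | AdventOfCode2015/day11.py | has_two_pairs
-- ===== SOURCE A (Python) =====
-- def has_two_pairs(d):
--     pairs = set()
--     i = 0
--     while i < len(d)-1:
--         if d[i] == d[i+1]:
--             pairs.add(d[i])
--             i += 2
--         else:
--             i += 1
--     return len(pairs) >= 2
-- ===== SOURCE B (Python) =====
-- def has_two_pairs(d):
--     # manual groupby: one pass tracking maximal runs of equal characters;
--     # a character has a repeated pair iff one of its runs reaches length 2
--     doubled = set()
--     prev, run = None, 0
--     for ch in d:
--         run = run + 1 if ch == prev else 1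
--         prev = ch
--         if run == 2:
--             doubled.add(ch)
--     return len(doubled) >= 2
-- ===== Notes on version B (the rewrite author's own statement) =====
-- stated objective: idiomatic
-- what changed: Replaced the index-skipping while loop over positions with a single run-length pass (a manual groupby: track the current run of equal characters, record a character when its run reaches length 2), returning whether at least two distinct characters own such a run.
import Mathlib
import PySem

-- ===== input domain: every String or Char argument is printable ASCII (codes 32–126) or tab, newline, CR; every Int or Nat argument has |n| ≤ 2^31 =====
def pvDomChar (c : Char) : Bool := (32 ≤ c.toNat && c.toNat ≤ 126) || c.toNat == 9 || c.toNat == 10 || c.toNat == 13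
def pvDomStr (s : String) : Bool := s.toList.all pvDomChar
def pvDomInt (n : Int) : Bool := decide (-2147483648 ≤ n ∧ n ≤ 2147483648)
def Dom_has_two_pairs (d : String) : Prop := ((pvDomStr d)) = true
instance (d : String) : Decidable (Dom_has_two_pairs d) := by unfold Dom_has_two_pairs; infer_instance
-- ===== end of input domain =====

-- B replaces A's index-skipping while loop by a run-length (manual groupby) pass; objective: idiomatic.

-- ===== PORT A =====
-- A's while loop over index i; the suffix d[i:] represents i, matching A's
-- i += 2 (drop both pair characters) and i += 1 (drop one) steps.
def pvLoopA : List Char → PySem.Set Char → PySem.Set Char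
  | c1 :: c2 :: rest, pairs =>
      if c1 = c2 then pvLoopA rest (PySem.Set.add pairs c1)
      else pvLoopA (c2 :: rest) pairs
  | _, pairs => pairs
  termination_by l _ => l.length

def has_two_pairs (d : String) : Bool :=
  decide (2 ≤ PySem.Set.len (pvLoopA d.toList PySem.Set.empty))

-- ===== PORT B =====
-- B's for-loop state: (doubled, prev, run); prev = None is `none`, run starts at 0.
def pvLoopB : List Char → PySem.Set Char → Option Char → Nat → PySem.Set Char
  | [], doubled, _, _ => doubled
  | ch :: rest, doubled, prev, run =>
      let run' := if some ch = prev then run + 1 else 1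
      let doubled' := if run' = 2 then PySem.Set.add doubled ch else doubled
      pvLoopB rest doubled' (some ch) run'

def has_two_pairs_alt (d : String) : Bool :=
  decide (2 ≤ PySem.Set.len (pvLoopB d.toList PySem.Set.empty none 0))

-- ===== PRECONDITION & SPEC =====
def Spec_has_two_pairs (d : String) (out : Bool) : Prop := out = has_two_pairs_alt d
instance (d : String) (out : Bool) : Decidable (Spec_has_two_pairs d out) := by unfold Spec_has_two_pairs; infer_instance

-- ===== CLAIM (what is proved, stated in full; the proofs are below) =====
def Claim_equal_has_two_pairs : Prop := ∀ (d : String), Dom_has_two_pairs d → Spec_has_two_pairs d (has_two_pairs d)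

-- ===== LEMMAS AND PROOFS =====

-- x is the letter of some adjacent equal pair of l
def pvHasAdj (x : Char) : List Char → Prop
  | a :: b :: rest => (a = b ∧ a = x) ∨ pvHasAdj x (b :: rest)
  | _ => False

theorem pvHasAdj_cons_of (x c : Char) (l : List Char) (h : pvHasAdj x l) :
    pvHasAdj x (c :: l) := by
  cases l with
  | nil => simp [pvHasAdj] at h
  | cons b rest => exact Or.inr h

theorem pvHasAdj_cons_elim (x c : Char) (l : List Char) (h : pvHasAdj x (c :: l)) :
    x = c ∨ pvHasAdj x l := by
  cases l with
  | nil => simp [pvHasAdj] at h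
  | cons b rest =>
    rcases h with ⟨hcb, hcx⟩ | h
    · exact Or.inl hcx.symm
    · exact Or.inr h

theorem pvHasAdj_pair (x c : Char) (l : List Char) :
    pvHasAdj x (c :: c :: l) ↔ x = c ∨ pvHasAdj x l := by
  constructor
  · intro h
    rcases h with ⟨_, hx⟩ | h
    · exact Or.inl hx.symm
    · rcases pvHasAdj_cons_elim x c l h with h | h
      · exact Or.inl h
      · exact Or.inr h
  · intro h
    rcases h with h | h
    · exact Or.inl ⟨rfl, h.symm⟩
    · exact Or.inr (pvHasAdj_cons_of x c l h)

theorem pvLoopA_mem (l : List Char) (s : PySem.Set Char) (x : Char) :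
    x ∈ pvLoopA l s ↔ x ∈ s ∨ pvHasAdj x l := by
  induction l, s using pvLoopA.induct with
  | case1 c2 rest pairs ih =>
    rw [pvLoopA, if_pos rfl, ih, PySem.Set.mem_add, pvHasAdj_pair]
    tauto
  | case2 c1 c2 rest pairs hne ih =>
    rw [pvLoopA, if_neg hne, ih]
    have : pvHasAdj x (c1 :: c2 :: rest) ↔ pvHasAdj x (c2 :: rest) := by
      constructor
      · intro h; rcases h with ⟨h1, _⟩ | h
        · exact absurd h1 hne
        · exact h
      · exact Or.inr
    rw [this]
  | case3 l s h =>
    cases l with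
    | nil => simp [pvLoopA, pvHasAdj]
    | cons a t =>
      cases t with
      | nil => simp [pvLoopA, pvHasAdj]
      | cons b r => exact absurd rfl (h a b r)


theorem pvLoopA_nodup (l : List Char) (s : PySem.Set Char) (hs : s.Nodup) :
    (pvLoopA l s).Nodup := by
  induction l, s using pvLoopA.induct with
  | case1 c2 rest pairs ih =>
    rw [pvLoopA, if_pos rfl]
    exact ih (PySem.Set.nodup_add pairs c2 hs)
  | case2 c1 c2 rest pairs hne ih =>
    rw [pvLoopA, if_neg hne]
    exact ih hs
  | case3 l s h =>
    cases l with
    | nil => simpa [pvLoopA] using hs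
    | cons a t =>
      cases t with
      | nil => simpa [pvLoopA] using hs
      | cons b r => exact absurd rfl (h a b r)

theorem pvLoopB_cons (ch : Char) (rest : List Char) (s : PySem.Set Char)
    (p : Option Char) (r : Nat) :
    pvLoopB (ch :: rest) s p r =
      pvLoopB rest (if (if some ch = p then r + 1 else 1) = 2 then s.add ch else s)
        (some ch) (if some ch = p then r + 1 else 1) := rfl

theorem pvHasAdj_cons₂ (x a b : Char) (l : List Char) :
    pvHasAdj x (a :: b :: l) ↔ (a = b ∧ a = x) ∨ pvHasAdj x (b :: l) := Iff.rfl

theorem pvLoopB_mem_some (l : List Char) (s : PySem.Set Char) (p : Char) (r : Nat)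
    (hr : 1 ≤ r) (hin : 2 ≤ r → p ∈ s) (x : Char) :
    x ∈ pvLoopB l s (some p) r ↔ x ∈ s ∨ pvHasAdj x (p :: l) := by
  induction l generalizing s p r with
  | nil => simp [pvLoopB, pvHasAdj]
  | cons ch rest ih =>
    rw [pvLoopB_cons]
    by_cases hc : ch = p
    · subst hc
      rw [if_pos rfl]
      by_cases hr1 : r = 1
      · subst hr1
        rw [if_pos (by omega : 1 + 1 = 2)]
        rw [ih (PySem.Set.add s ch) ch (1 + 1) (by omega)
          (fun _ => (PySem.Set.mem_add s ch ch).mpr (Or.inr rfl))]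
        rw [PySem.Set.mem_add, pvHasAdj_pair]
        constructor
        · rintro ((h | h) | h)
          · exact Or.inl h
          · exact Or.inr (Or.inl h)
          · rcases pvHasAdj_cons_elim x ch rest h with h | h
            · exact Or.inr (Or.inl h)
            · exact Or.inr (Or.inr h)
        · rintro (h | h | h)
          · exact Or.inl (Or.inl h)
          · exact Or.inl (Or.inr h)
          · exact Or.inr (pvHasAdj_cons_of x ch rest h)
      · have hr2 : 2 ≤ r := by omega
        have hs : ch ∈ s := hin hr2
        rw [if_neg (by omega : ¬ r + 1 = 2)]
        rw [ih s ch (r + 1) (by omega) (fun _ => hs)]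
        rw [pvHasAdj_pair]
        constructor
        · rintro (h | h)
          · exact Or.inl h
          · rcases pvHasAdj_cons_elim x ch rest h with h | h
            · exact Or.inr (Or.inl h)
            · exact Or.inr (Or.inr h)
        · rintro (h | h | h)
          · exact Or.inl h
          · exact Or.inl (h ▸ hs)
          · exact Or.inr (pvHasAdj_cons_of x ch rest h)
    · rw [if_neg (fun h => hc (Option.some.inj h)), if_neg (by omega : ¬ (1 : Nat) = 2)]
      rw [ih s ch 1 (by omega) (by omega)]
      rw [pvHasAdj_cons₂]
      constructor
      · rintro (h | h)
        · exact Or.inl h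
        · exact Or.inr (Or.inr h)
      · rintro (h | ⟨h1, _⟩ | h)
        · exact Or.inl h
        · exact absurd h1.symm hc
        · exact Or.inr h

theorem pvLoopB_mem (l : List Char) (s : PySem.Set Char) (x : Char) :
    x ∈ pvLoopB l s none 0 ↔ x ∈ s ∨ pvHasAdj x l := by
  cases l with
  | nil => simp [pvLoopB, pvHasAdj]
  | cons ch rest =>
    rw [pvLoopB_cons]
    rw [if_neg (by simp : ¬ (some ch = none)), if_neg (by omega : ¬ (1 : Nat) = 2)]
    exact pvLoopB_mem_some rest s ch 1 (by omega) (by omega) x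

theorem pvLoopB_nodup (l : List Char) (s : PySem.Set Char) (p : Option Char) (r : Nat)
    (hs : s.Nodup) : (pvLoopB l s p r).Nodup := by
  induction l generalizing s p r with
  | nil => simpa [pvLoopB] using hs
  | cons ch rest ih =>
    rw [pvLoopB_cons]
    apply ih
    split <;> split
    · exact PySem.Set.nodup_add s ch hs
    · exact hs
    · exact PySem.Set.nodup_add s ch hs
    · exact hs

theorem pv_sets_perm (l : List Char) :
    (pvLoopA l PySem.Set.empty).Perm (pvLoopB l PySem.Set.empty none 0) := by
  rw [List.perm_ext_iff_of_nodup
    (pvLoopA_nodup l PySem.Set.empty List.nodup_nil)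
    (pvLoopB_nodup l PySem.Set.empty none 0 List.nodup_nil)]
  intro x
  rw [pvLoopA_mem, pvLoopB_mem]

-- ===== VERDICT (by name: the statement is the Claim_ definition above) =====
theorem has_two_pairs_spec : Claim_equal_has_two_pairs := by
  intro d _
  unfold Spec_has_two_pairs has_two_pairs has_two_pairs_alt PySem.Set.len
  rw [(pv_sets_perm d.toList).length_eq]
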